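-- pv_equiv track=rewrite | github.com/veeral-patel/leetcode-samples | sliding_window/least_consecutive_cards_to_match.py | least_consecutive_cards_to_match
-- ===== SOURCE A (Python) =====
-- from typing import List
-- from collections import Counter
--
-- def least_consecutive_cards_to_match(cards: List[int]) -> int:
--     left, right = 0, 1
--     ans = float("inf")
--
--     while right <= len(cards):
--         window = cards[left:right]
--         if has_pair(window):
--             ans = min(ans, len(window))
--             left += 1
--         else:
--             right += 1
--
--     return ans if ans != float("inf") else -1
--
-- def has_pair(arr: List[int]) -> bool:
--     counter = Counter(arr)
--     for k, v in counter.items():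
--         if v == 2: # found a pair
--             return True
--     return False
-- ===== SOURCE B (Python) =====
-- from typing import List
--
-- def least_consecutive_cards_to_match(cards: List[int]) -> int:
--     last = {}
--     best = None
--     for i, c in enumerate(cards):
--         if c in last:
--             d = i - last[c] + 1
--             if best is None or d < best:
--                 best = d
--         last[c] = i
--     return -1 if best is None else best
-- ===== Notes on version B (the rewrite author's own statement) =====
-- stated objective: faster
-- what changed: replaced the shrinking/growing window that re-counts every slice with a single pass keeping the last-seen index per card and minimising i - last[c] + 1
import Mathlib
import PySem

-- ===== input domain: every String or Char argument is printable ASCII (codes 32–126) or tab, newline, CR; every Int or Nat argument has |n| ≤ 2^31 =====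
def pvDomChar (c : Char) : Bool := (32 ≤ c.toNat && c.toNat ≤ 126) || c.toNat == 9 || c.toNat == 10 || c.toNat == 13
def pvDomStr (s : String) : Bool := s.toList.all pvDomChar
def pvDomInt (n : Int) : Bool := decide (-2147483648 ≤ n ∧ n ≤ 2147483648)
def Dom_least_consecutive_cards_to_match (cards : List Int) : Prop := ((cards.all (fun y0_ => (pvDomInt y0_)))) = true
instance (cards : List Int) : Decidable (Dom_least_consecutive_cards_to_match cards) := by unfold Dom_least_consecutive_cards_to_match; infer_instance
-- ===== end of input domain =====

-- B replaces A's grow/shrink window (which re-counts every slice) by a single pass that keeps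
-- the last-seen index of each card and minimises i - last[c] + 1; objective: faster.

-- ===== PORT A =====

-- has_pair: Counter(arr), then scan the items for a count equal to 2
def hasPairA (arr : List Int) : Bool :=
  (PySem.Dict.counter arr).items.any (fun kv => kv.2 == 2)

theorem hasPairA_iff (arr : List Int) : hasPairA arr = true ↔ ∃ c, arr.count c = 2 := by
  unfold hasPairA
  rw [PySem.Dict.items_counter]
  simp only [List.any_map, List.any_eq_true, Function.comp, beq_iff_eq]
  constructor
  · rintro ⟨c, _, hc⟩
    exact ⟨c, by exact_mod_cast hc⟩
  · rintro ⟨c, hc⟩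
    refine ⟨c, ?_, by exact_mod_cast hc⟩
    have : c ∈ arr := List.count_pos_iff.mp (by omega)
    simpa [PySem.Set.mem_ofList] using this

theorem hasPairA_two_le_length (arr : List Int) (h : hasPairA arr = true) : 2 ≤ arr.length := by
  obtain ⟨c, hc⟩ := (hasPairA_iff arr).mp h
  have := List.count_le_length (l := arr) (a := c)
  omega

def loopA (cards : List Int) (l r : Nat) (ans : Option Nat) : Option Nat :=
  if hr : r ≤ cards.length then
    if hp : hasPairA (PySem.List.slice cards (some (l : Int)) (some (r : Int))) = true then
      loopA cards (l + 1) r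
        (some (match ans with
          | none => (PySem.List.slice cards (some (l : Int)) (some (r : Int))).length
          | some a => min a (PySem.List.slice cards (some (l : Int)) (some (r : Int))).length))
    else
      loopA cards l (r + 1) ans
  else ans
termination_by (cards.length + 1 - r) + (cards.length + 1 - l)
decreasing_by
  · have h2 := hasPairA_two_le_length _ hp
    rw [PySem.List.slice_natCast] at h2
    simp only [List.length_take, List.length_drop] at h2
    omega
  · omega

def least_consecutive_cards_to_match (cards : List Int) : Int :=
  match loopA cards 0 1 none with
  | some m => (m : Int)
  | none => -1

-- ===== PORT B =====

-- loop body of B: p = (i, c); update best from the last-seen index of c, then record i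
def stepB (st : PySem.Dict Int Int × Option Int) (p : Int × Int) :
    PySem.Dict Int Int × Option Int :=
  match st.1.get? p.2 with
  | some j =>
      (st.1.insert p.2 p.1,
        match st.2 with
        | none => some (p.1 - j + 1)
        | some b => if p.1 - j + 1 < b then some (p.1 - j + 1) else some b)
  | none => (st.1.insert p.2 p.1, st.2)

def least_consecutive_cards_to_match_alt (cards : List Int) : Int :=
  match ((PySem.List.enumerate cards 0).foldl stepB (PySem.Dict.empty, none)).2 with
  | some b => b
  | none => -1

-- ===== PRECONDITION & SPEC =====
def Spec_least_consecutive_cards_to_match (cards : List Int) (out : Int) : Prop := out = least_consecutive_cards_to_match_alt cards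
instance (cards : List Int) (out : Int) : Decidable (Spec_least_consecutive_cards_to_match cards out) := by unfold Spec_least_consecutive_cards_to_match; infer_instance

-- ===== CLAIM (what is proved, stated in full; the proofs are below) =====
def Claim_equal_least_consecutive_cards_to_match : Prop := ∀ (cards : List Int), Dom_least_consecutive_cards_to_match cards → Spec_least_consecutive_cards_to_match cards (least_consecutive_cards_to_match cards)

-- ===== LEMMAS AND PROOFS =====

-- `QQ cards d` : two equal cards span a window of exactly d consecutive positions
def QQ (cards : List Int) (d : Nat) : Prop :=
  ∃ i j : Nat, i < j ∧ j < cards.length ∧ cards.getD i 0 = cards.getD j 0 ∧ d = j - i + 1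

def PairIn (cards : List Int) (a b : Nat) : Prop :=
  ∃ i j : Nat, a ≤ i ∧ i < j ∧ j < b ∧ cards.getD i 0 = cards.getD j 0

theorem pair_of_two_le_count (l : List Int) (c : Int) (h : 2 ≤ l.count c) :
    ∃ i j : Nat, i < j ∧ j < l.length ∧ l.getD i 0 = c ∧ l.getD j 0 = c := by
  induction l with
  | nil => simp at h
  | cons x t ih =>
      by_cases hx : x = c
      · subst hx
        rw [List.count_cons_self] at h
        have hm : x ∈ t := List.count_pos_iff.mp (by omega)
        obtain ⟨j', hj', hjt⟩ := List.mem_iff_getElem.mp hm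
        exact ⟨0, j' + 1, by omega, by simpa using hj',
          by simp, by simp [List.getD_eq_getElem?_getD, hj', hjt]⟩
      · rw [List.count_cons_of_ne hx] at h
        obtain ⟨i, j, hij, hj, hi', hj'⟩ := ih h
        exact ⟨i + 1, j + 1, by omega, by simpa using hj, by simpa using hi', by simpa using hj'⟩

theorem two_le_count_of_pair (l : List Int) (i j : Nat) (hij : i < j) (hj : j < l.length)
    (h : l.getD i 0 = l.getD j 0) : 2 ≤ l.count (l.getD j 0) := by
  induction l generalizing i j with
  | nil => simp at hj
  | cons x t ih =>
      cases i with
      | zero =>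
          cases j with
          | zero => omega
          | succ j' =>
              have hx : x = (x :: t).getD (j' + 1) 0 := by simpa using h
              rw [← hx, List.count_cons_self]
              have hmem : x ∈ t := by
                have h1 : t.getD j' 0 = x := by simpa using hx.symm
                have hjt : j' < t.length := by simpa using hj
                rw [← h1]
                rw [List.getD_eq_getElem?_getD, List.getElem?_eq_getElem hjt]
                exact List.getElem_mem hjt
              have := List.count_pos_iff.mpr hmem
              omega
      | succ i' =>
          cases j with
          | zero => omega
          | succ j' =>
              have hjt : j' < t.length := by simpa using hj
              have h' : t.getD i' 0 = t.getD j' 0 := by simpa using h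
              have := ih i' j' (by omega) hjt h'
              have hc : (x :: t).getD (j' + 1) 0 = t.getD j' 0 := by simp
              rw [hc, List.count_cons]
              omega

theorem win_getD (cards : List Int) (l r i : Nat) (hli : l ≤ i) (hir : i < r)
    (_hin : i < cards.length) :
    ((cards.drop l).take (r - l)).getD (i - l) 0 = cards.getD i 0 := by
  rw [List.getD_eq_getElem?_getD, List.getD_eq_getElem?_getD]
  rw [List.getElem?_take_of_lt (by omega)]
  rw [List.getElem?_drop]
  have h2 : l + (i - l) = i := by omega
  rw [h2]

theorem tail_take_sublist {α : Type} (t : List α) (m : Nat) :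
    List.Sublist ((t.drop 1).take m) (t.take (m + 1)) := by
  cases t with
  | nil => simp
  | cons x t' => simpa using List.Sublist.cons x (List.Sublist.refl (t'.take m))

theorem loopA_main (cards : List Int) (k : Nat) : ∀ (l r : Nat) (ans : Option Nat),
    (cards.length + 1 - r) + (cards.length + 1 - l) ≤ k →
    l < r → r ≤ cards.length + 1 →
    (∀ x, ((cards.drop l).take (r - l)).count x ≤ 2) →
    (∀ a b : Nat, l ≤ a → a < b → b ≤ cards.length → r ≤ b → PairIn cards a b →
        ∃ m, loopA cards l r ans = some m ∧ m ≤ b - a) ∧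
    (loopA cards l r ans = none → ans = none) ∧
    (∀ m, loopA cards l r ans = some m →
        ans = some m ∨ ∃ d, QQ cards d ∧ d ≤ m) ∧
    (∀ m0, ans = some m0 → ∃ m, loopA cards l r ans = some m ∧ m ≤ m0) := by
  induction k with
  | zero =>
      intro l r ans hk hlr hr _
      omega
  | succ k ih =>
      intro l r ans hk hlr hr hinv
      by_cases hr' : r ≤ cards.length
      · rw [loopA.eq_def, dif_pos hr']
        by_cases hp : hasPairA (PySem.List.slice cards (some (l : Int)) (some (r : Int))) = true
        · rw [dif_pos hp]
          rw [PySem.List.slice_natCast] at hp ⊢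
          set w := (cards.drop l).take (r - l) with hw
          obtain ⟨c, hc2⟩ := (hasPairA_iff w).mp hp
          have hcl : 2 ≤ w.length := by
            have := List.count_le_length (l := w) (a := c); omega
          have hwlen : w.length = r - l := by
            simp only [hw, List.length_take, List.length_drop]; omega
          have hl2 : l + 2 ≤ r := by omega
          -- the new answer
          set m0 : Nat := (match ans with
            | none => w.length
            | some a => min a w.length) with hm0
          have hm0le : m0 ≤ r - l := by
            cases ans <;> simp [hm0] <;> omega
          -- invariant for the shrunk window
          have hsub : List.Sublist ((cards.drop (l + 1)).take (r - (l + 1))) w := by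
            have h1 : cards.drop (l + 1) = (cards.drop l).drop 1 := by
              rw [List.drop_drop]
            rw [h1]
            have h2 : r - l = (r - (l + 1)) + 1 := by omega
            rw [hw, h2]
            exact tail_take_sublist _ _
          have hinv' : ∀ x, ((cards.drop (l + 1)).take (r - (l + 1))).count x ≤ 2 :=
            fun x => le_trans (hsub.count_le x) (hinv x)
          obtain ⟨IH1, IH2, IH3, IH4⟩ := ih (l + 1) r (some m0) (by omega) (by omega) hr hinv'
          -- a pair inside the current window, giving a global QQ value ≤ r - l
          have hQwin : ∃ d, QQ cards d ∧ d ≤ r - l := by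
            obtain ⟨i', j', hij', hj', hi'c, hj'c⟩ := pair_of_two_le_count w c (by omega)
            have hjr : l + j' < r := by omega
            have hjn : l + j' < cards.length := by omega
            have hgi : cards.getD (l + i') 0 = c := by
              rw [← win_getD cards l r (l + i') (by omega) (by omega) (by omega)]
              simpa [hw] using hi'c
            have hgj : cards.getD (l + j') 0 = c := by
              rw [← win_getD cards l r (l + j') (by omega) hjr hjn]
              simpa [hw] using hj'c
            exact ⟨j' - i' + 1, ⟨l + i', l + j', by omega, hjn, by rw [hgi, hgj], by omega⟩,
              by omega⟩
          refine ⟨?_, ?_, ?_, ?_⟩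
          · intro a b ha hab hbn hrb hpair
            rcases Nat.lt_or_ge l a with hla | hla
            · exact IH1 a b (by omega) hab hbn hrb hpair
            · have ha' : a = l := by omega
              obtain ⟨m, hm, hmle⟩ := IH4 m0 rfl
              exact ⟨m, hm, by omega⟩
          · intro h
            have := IH2 h
            simp at this
          · intro m hm
            rcases IH3 m hm with h | h
            · -- ans' = some m, i.e. m = m0
              have hmm : m = m0 := by
                simpa using h.symm
              cases hans : ans with
              | none =>
                  right
                  obtain ⟨d, hQ, hd⟩ := hQwin
                  refine ⟨d, hQ, ?_⟩
                  subst hans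
                  simp only [hm0] at hmm
                  omega
              | some a0 =>
                  subst hans
                  simp only [hm0] at hmm
                  rcases Nat.le_total a0 w.length with hle | hle
                  · left
                    rw [hmm, min_eq_left hle]
                  · right
                    obtain ⟨d, hQ, hd⟩ := hQwin
                    refine ⟨d, hQ, ?_⟩
                    rw [hmm, min_eq_right hle]
                    omega
            · exact Or.inr h
          · intro a0 ha0
            have : m0 ≤ a0 := by
              subst ha0
              simp [hm0]
            obtain ⟨m, hm, hmle⟩ := IH4 m0 rfl
            exact ⟨m, hm, by omega⟩
        · rw [dif_neg hp]
          rw [PySem.List.slice_natCast] at hp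
          set w := (cards.drop l).take (r - l) with hw
          have hle1 : ∀ x, w.count x ≤ 1 := by
            intro x
            have h2 := hinv x
            have hne : w.count x ≠ 2 := by
              intro hx
              exact hp ((hasPairA_iff w).mpr ⟨x, hx⟩)
            omega
          have hwin' : (cards.drop l).take (r + 1 - l) = w ++ ((cards.drop l)[r - l]?).toList := by
            have h2 : r + 1 - l = (r - l) + 1 := by omega
            rw [h2, hw, List.take_add_one]
          have hinv'' : ∀ x, ((cards.drop l).take (r + 1 - l)).count x ≤ 2 := by
            intro x
            rw [hwin', List.count_append]
            have := hle1 x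
            have hopt : (((cards.drop l)[r - l]?).toList).count x ≤ 1 := by
              cases (cards.drop l)[r - l]? <;> simp [List.count_singleton] <;> split <;> omega
            omega
          obtain ⟨IH1, IH2, IH3, IH4⟩ := ih l (r + 1) ans (by omega) (by omega) (by omega) hinv''
          refine ⟨?_, IH2, IH3, IH4⟩
          intro a b ha hab hbn hrb hpair
          rcases Nat.lt_or_ge b (r + 1) with hbr | hbr
          · -- b = r : the current window has no pair, contradiction
            exfalso
            have hb : b = r := by omega
            obtain ⟨i, j, hai, hij, hjb, heq⟩ := hpair
            have hjr : j < r := by omega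
            have hjn : j < cards.length := by omega
            have hwi : w.getD (i - l) 0 = cards.getD i 0 :=
              win_getD cards l r i (by omega) (by omega) (by omega)
            have hwj : w.getD (j - l) 0 = cards.getD j 0 :=
              win_getD cards l r j (by omega) hjr hjn
            have hjw : j - l < w.length := by
              simp only [hw, List.length_take, List.length_drop]
              omega
            have hcnt := two_le_count_of_pair w (i - l) (j - l) (by omega) hjw
              (by rw [hwi, hwj]; exact heq)
            have := hle1 (w.getD (j - l) 0)
            omega
          · exact IH1 a b ha hab hbn hbr hpair
      · rw [loopA.eq_def, dif_neg hr']
        refine ⟨?_, fun h => h, fun m hm => Or.inl hm, fun m0 h => ⟨m0, h, le_refl _⟩⟩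
        intro a b _ _ hbn hrb _
        omega

def Good (cards : List Int) (res : Option Nat) : Prop :=
  (res = none → ∀ d, ¬ QQ cards d) ∧
  (∀ m, res = some m → QQ cards m ∧ ∀ d, QQ cards d → m ≤ d)

theorem loopA_good (cards : List Int) : Good cards (loopA cards 0 1 none) := by
  have hinv : ∀ x, ((cards.drop 0).take (1 - 0)).count x ≤ 2 := by
    intro x
    have := List.count_le_length (l := (cards.drop 0).take (1 - 0)) (a := x)
    have : ((cards.drop 0).take (1 - 0)).length ≤ 1 := by
      simp [List.length_take]
    omega
  obtain ⟨C1, C2, C3, C4⟩ := loopA_main cards (2 * cards.length + 2) 0 1 none (by omega)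
    (by omega) (by omega) hinv
  constructor
  · intro hnone d hQ
    obtain ⟨i, j, hij, hj, heq, hd⟩ := hQ
    obtain ⟨m, hm, _⟩ := C1 i (j + 1) (by omega) (by omega) (by omega) (by omega)
      ⟨i, j, le_refl _, hij, by omega, heq⟩
    rw [hnone] at hm
    simp at hm
  · intro m hm
    have hmin : ∀ d, QQ cards d → m ≤ d := by
      intro d hQ
      obtain ⟨i, j, hij, hj, heq, hd⟩ := hQ
      obtain ⟨m', hm', hle⟩ := C1 i (j + 1) (by omega) (by omega) (by omega) (by omega)
        ⟨i, j, le_refl _, hij, by omega, heq⟩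
      rw [hm] at hm'
      have : m' = m := by simpa using hm'.symm
      omega
    rcases C3 m hm with h | ⟨d, hQ, hd⟩
    · simp at h
    · have := hmin d hQ
      have hdm : d = m := by omega
      exact ⟨hdm ▸ hQ, hmin⟩

-- B-side invariant: the dict holds each card's last index, best the least QQ value so far
def InvB (cards : List Int) (st : PySem.Dict Int Int × Option Int) : Prop :=
  (∀ c v, st.1.get? c = some v ↔
      ∃ j : Nat, v = (j : Int) ∧ j < cards.length ∧ cards.getD j 0 = c ∧
        ∀ j', j' < cards.length → cards.getD j' 0 = c → j' ≤ j) ∧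
  (st.2 = none → ∀ d, ¬ QQ cards d) ∧
  (∀ b, st.2 = some b → ∃ m : Nat, b = (m : Int) ∧ QQ cards m ∧ ∀ d, QQ cards d → m ≤ d)

theorem getD_append_lt (xs : List Int) (x : Int) (j : Nat) (h : j < xs.length) :
    (xs ++ [x]).getD j 0 = xs.getD j 0 := by
  rw [List.getD_eq_getElem?_getD, List.getD_eq_getElem?_getD, List.getElem?_append_left h]

theorem getD_append_self (xs : List Int) (x : Int) :
    (xs ++ [x]).getD xs.length 0 = x := by
  rw [List.getD_eq_getElem?_getD, List.getElem?_append_right (le_refl _)]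
  simp

theorem QQ_append (xs : List Int) (x : Int) (d : Nat) :
    QQ (xs ++ [x]) d ↔ QQ xs d ∨
      ∃ i, i < xs.length ∧ xs.getD i 0 = x ∧ d = xs.length - i + 1 := by
  constructor
  · rintro ⟨i, j, hij, hj, heq, hd⟩
    simp only [List.length_append, List.length_singleton] at hj
    rcases Nat.lt_or_ge j xs.length with hjn | hjn
    · left
      exact ⟨i, j, hij, hjn, by
        rw [getD_append_lt xs x i (by omega), getD_append_lt xs x j hjn] at heq
        exact heq, hd⟩
    · have hj' : j = xs.length := by omega
      right
      subst hj'
      rw [getD_append_lt xs x i (by omega), getD_append_self] at heq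
      exact ⟨i, hij, heq, hd⟩
  · rintro (⟨i, j, hij, hj, heq, hd⟩ | ⟨i, hi, heq, hd⟩)
    · exact ⟨i, j, hij, by simp; omega,
        by rw [getD_append_lt xs x i (by omega), getD_append_lt xs x j hj]; exact heq, hd⟩
    · exact ⟨i, xs.length, hi, by simp,
        by rw [getD_append_lt xs x i hi, getD_append_self]; exact heq, hd⟩

def DictInv (cards : List Int) (d : PySem.Dict Int Int) : Prop :=
  ∀ c v, d.get? c = some v ↔
      ∃ j : Nat, v = (j : Int) ∧ j < cards.length ∧ cards.getD j 0 = c ∧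
        ∀ j', j' < cards.length → cards.getD j' 0 = c → j' ≤ j

theorem dictInv_insert (xs : List Int) (x : Int) (d : PySem.Dict Int Int)
    (hd : DictInv xs d) : DictInv (xs ++ [x]) (d.insert x (xs.length : Int)) := by
  intro c v
  rw [PySem.Dict.get?_insert]
  by_cases hc : c = x
  · subst hc
    rw [if_pos rfl]
    constructor
    · rintro h
      have hv : v = (xs.length : Int) := by simpa using h.symm
      refine ⟨xs.length, hv, by simp, getD_append_self xs c, ?_⟩
      intro j' hj' _
      simp only [List.length_append, List.length_singleton] at hj'
      omega
    · rintro ⟨j, hv, hj, hval, hmax⟩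
      have hn : xs.length ≤ j := by
        apply hmax xs.length (by simp) (getD_append_self xs c)
      have hj' : j = xs.length := by
        simp only [List.length_append, List.length_singleton] at hj
        omega
      rw [hv, hj']
  · rw [if_neg hc]
    rw [hd c v]
    constructor
    · rintro ⟨j, hv, hj, hval, hmax⟩
      refine ⟨j, hv, by simp; omega, by rw [getD_append_lt xs x j hj]; exact hval, ?_⟩
      intro j' hj' hval'
      simp only [List.length_append, List.length_singleton] at hj'
      rcases Nat.lt_or_ge j' xs.length with h1 | h1
      · exact hmax j' h1 (by rw [getD_append_lt xs x j' h1] at hval'; exact hval')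
      · exfalso
        have : j' = xs.length := by omega
        subst this
        rw [getD_append_self] at hval'
        exact hc hval'.symm
    · rintro ⟨j, hv, hj, hval, hmax⟩
      simp only [List.length_append, List.length_singleton] at hj
      have hjn : j < xs.length := by
        rcases Nat.lt_or_ge j xs.length with h1 | h1
        · exact h1
        · exfalso
          have : j = xs.length := by omega
          subst this
          rw [getD_append_self] at hval
          exact hc hval.symm
      refine ⟨j, hv, hjn, by rw [getD_append_lt xs x j hjn] at hval; exact hval, ?_⟩
      intro j' hj' hval'
      exact hmax j' (by simp; omega) (by rw [getD_append_lt xs x j' hj']; exact hval')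

theorem foldB_inv (cards : List Int) :
    InvB cards ((PySem.List.enumerate cards 0).foldl stepB (PySem.Dict.empty, none)) := by
  induction cards using List.reverseRecOn with
  | nil =>
      refine ⟨?_, ?_, ?_⟩
      · intro c v
        simp [PySem.List.enumerate_nil, PySem.Dict.get?_empty]
      · intro _ d hQ
        obtain ⟨i, j, _, hj, _, _⟩ := hQ
        simp at hj
      · intro b hb
        simp [PySem.List.enumerate_nil] at hb
  | append_singleton xs x ih =>
      obtain ⟨ihD, ihN, ihS⟩ := ih
      set st := (PySem.List.enumerate xs 0).foldl stepB (PySem.Dict.empty, none) with hst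
      have hfold : (PySem.List.enumerate (xs ++ [x]) 0).foldl stepB (PySem.Dict.empty, none)
          = stepB st ((xs.length : Int), x) := by
        rw [PySem.List.enumerate_append, List.foldl_append]
        simp [PySem.List.enumerate_cons, PySem.List.enumerate_nil]
        rw [← hst]
      rw [hfold]
      cases hget : st.1.get? x with
      | none =>
          have hnoocc : ∀ j, j < xs.length → xs.getD j 0 ≠ x := by
            intro j hj hval
            set P : Nat → Prop := fun j => j < xs.length ∧ xs.getD j 0 = x with hP
            have hPj : P j := ⟨hj, hval⟩
            have hspec := Nat.findGreatest_spec (m := j) (n := xs.length) (by omega) hPj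
            have hmax : ∀ j', j' < xs.length → xs.getD j' 0 = x →
                j' ≤ Nat.findGreatest P xs.length := by
              intro j' h1 h2
              exact Nat.le_findGreatest (by omega) ⟨h1, h2⟩
            have := (ihD x ((Nat.findGreatest P xs.length : Nat) : Int)).mpr
              ⟨Nat.findGreatest P xs.length, rfl, hspec.1, hspec.2, hmax⟩
            rw [hget] at this
            simp at this
          have hstep : stepB st ((xs.length : Int), x) = (st.1.insert x (xs.length : Int), st.2) := by
            simp only [stepB, hget]
          rw [hstep]
          refine ⟨dictInv_insert xs x st.1 ihD, ?_, ?_⟩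
          · intro hn d hQ
            rcases (QQ_append xs x d).mp hQ with h | ⟨i, hi, hval, _⟩
            · exact ihN hn d h
            · exact hnoocc i hi hval
          · intro b hb
            obtain ⟨m, hbm, hQ, hmin⟩ := ihS b hb
            refine ⟨m, hbm, (QQ_append xs x m).mpr (Or.inl hQ), ?_⟩
            intro d hQ'
            rcases (QQ_append xs x d).mp hQ' with h | ⟨i, hi, hval, _⟩
            · exact hmin d h
            · exact absurd hval (hnoocc i hi)
      | some v =>
          obtain ⟨j0, hv, hj0, hocc, hmax⟩ := (ihD x v).mp hget
          -- the candidate gap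
          have hgap : (xs.length : Int) - v + 1 = ((xs.length - j0 + 1 : Nat) : Int) := by
            rw [hv]; push_cast; omega
          have hQg : QQ (xs ++ [x]) (xs.length - j0 + 1) :=
            (QQ_append xs x _).mpr (Or.inr ⟨j0, hj0, hocc, rfl⟩)
          have hnewge : ∀ d, (∃ i, i < xs.length ∧ xs.getD i 0 = x ∧ d = xs.length - i + 1) →
              xs.length - j0 + 1 ≤ d := by
            rintro d ⟨i, hi, hval, hd⟩
            have := hmax i hi hval
            omega
          cases hb : st.2 with
          | none =>
              have hstep : stepB st ((xs.length : Int), x) =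
                  (st.1.insert x (xs.length : Int), some ((xs.length : Int) - v + 1)) := by
                simp only [stepB, hget, hb]
              rw [hstep]
              refine ⟨dictInv_insert xs x st.1 ihD, by simp, ?_⟩
              intro b hbeq
              have hbeq' : b = (xs.length : Int) - v + 1 := by simpa using hbeq.symm
              refine ⟨xs.length - j0 + 1, by rw [hbeq', hgap], hQg, ?_⟩
              intro d hQ'
              rcases (QQ_append xs x d).mp hQ' with h | h
              · exact absurd h (ihN hb d)
              · exact hnewge d h
          | some b0 =>
              obtain ⟨m, hbm, hQm, hmin⟩ := ihS b0 hb
              have hstep : stepB st ((xs.length : Int), x) =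
                  (st.1.insert x (xs.length : Int),
                   if (xs.length : Int) - v + 1 < b0 then some ((xs.length : Int) - v + 1)
                   else some b0) := by
                simp only [stepB, hget, hb]
              rw [hstep]
              refine ⟨dictInv_insert xs x st.1 ihD, by split <;> simp, ?_⟩
              intro b hbeq
              by_cases hlt : (xs.length : Int) - v + 1 < b0
              · rw [if_pos hlt] at hbeq
                have hbeq' : b = (xs.length : Int) - v + 1 := by simpa using hbeq.symm
                have hlt' : xs.length - j0 + 1 < m := by
                  rw [hgap, hbm] at hlt
                  exact_mod_cast hlt
                refine ⟨xs.length - j0 + 1, by rw [hbeq', hgap], hQg, ?_⟩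
                intro d hQ'
                rcases (QQ_append xs x d).mp hQ' with h | h
                · have := hmin d h; omega
                · exact hnewge d h
              · rw [if_neg hlt] at hbeq
                have hbeq' : b = b0 := by simpa using hbeq.symm
                have hge : m ≤ xs.length - j0 + 1 := by
                  rw [hgap, hbm] at hlt
                  have := not_lt.mp hlt
                  exact_mod_cast this
                refine ⟨m, by rw [hbeq', hbm], (QQ_append xs x m).mpr (Or.inl hQm), ?_⟩
                intro d hQ'
                rcases (QQ_append xs x d).mp hQ' with h | h
                · exact hmin d h
                · have := hnewge d h; omega

-- ===== VERDICT (by name: the statement is the Claim_ definition above) =====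
theorem least_consecutive_cards_to_match_spec : Claim_equal_least_consecutive_cards_to_match := by
  intro cards _
  unfold Spec_least_consecutive_cards_to_match
  unfold least_consecutive_cards_to_match least_consecutive_cards_to_match_alt
  obtain ⟨hA0, hA1⟩ := loopA_good cards
  obtain ⟨_, hB0, hB1⟩ := foldB_inv cards
  cases hLA : loopA cards 0 1 none with
  | none =>
      cases hLB : ((PySem.List.enumerate cards 0).foldl stepB (PySem.Dict.empty, none)).2 with
      | none => simp
      | some b =>
          obtain ⟨m, _, hQQ, _⟩ := hB1 b hLB
          exact absurd hQQ (hA0 hLA m)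
  | some m =>
      obtain ⟨hQm, hmin⟩ := hA1 m hLA
      cases hLB : ((PySem.List.enumerate cards 0).foldl stepB (PySem.Dict.empty, none)).2 with
      | none => exact absurd hQm (hB0 hLB m)
      | some b =>
          obtain ⟨m', hb, hQm', hmin'⟩ := hB1 b hLB
          have h1 := hmin m' hQm'
          have h2 := hmin' m hQm
          have : m = m' := le_antisymm h1 h2
          simp [hb, this]
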